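-- pv_equiv track=rewrite | github.com/sana-sinha/my-projects | conways-two-player.py | aliveCells
-- ===== SOURCE A (Python) =====
-- def aliveCells(board):
--   cellCounterX = 0
--   cellCounterO = 0
--   for i in range(len(board)):
--     for j in range(len(board[i])):
--       if board[i][j] == 1:
--         cellCounterX += 1
--       elif board[i][j] == 2:
--         cellCounterO += 1
--   return [cellCounterX, cellCounterO]
-- ===== SOURCE B (Python) =====
-- def aliveCells(board):
--   return [sum(row.count(1) for row in board),
--           sum(row.count(2) for row in board)]
-- ===== Notes on version B (the rewrite author's own statement) =====
-- stated objective: idiomatic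
-- what changed: Replaces the single index-driven nested loop with per-cell if/elif branching by two staged passes, each summing list.count of the target value over the rows.
import Mathlib
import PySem

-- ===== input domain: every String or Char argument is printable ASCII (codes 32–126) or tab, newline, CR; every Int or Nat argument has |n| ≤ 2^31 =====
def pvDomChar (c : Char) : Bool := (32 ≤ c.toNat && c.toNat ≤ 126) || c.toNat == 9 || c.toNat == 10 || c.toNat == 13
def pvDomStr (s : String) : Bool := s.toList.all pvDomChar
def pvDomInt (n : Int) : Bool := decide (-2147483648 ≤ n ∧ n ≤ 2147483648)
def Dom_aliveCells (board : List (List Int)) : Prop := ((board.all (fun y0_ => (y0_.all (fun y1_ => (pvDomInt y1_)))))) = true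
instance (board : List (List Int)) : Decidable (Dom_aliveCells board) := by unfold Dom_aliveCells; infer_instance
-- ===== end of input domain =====

-- B replaces the branching nested index loop by two staged passes summing row.count(1) and row.count(2) (idiomatic rewrite, same cost).


-- ===== PORT A =====
def aliveCells (board : List (List Int)) : List Int :=
  let s : Int × Int :=
    (PySem.List.pyRange 0 board.length 1).foldl
      (fun st i =>
        (PySem.List.pyRange 0 (PySem.List.pyGetD board i []).length 1).foldl
          (fun st j =>
            if PySem.List.pyGetD (PySem.List.pyGetD board i []) j 0 = 1 then (st.1 + 1, st.2)
            else if PySem.List.pyGetD (PySem.List.pyGetD board i []) j 0 = 2 then (st.1, st.2 + 1)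
            else st)
          st)
      (0, 0)
  [s.1, s.2]

-- ===== PORT B =====
def aliveCells_alt (board : List (List Int)) : List Int :=
  [(board.map (fun row => (row.count 1 : Int))).sum,
   (board.map (fun row => (row.count 2 : Int))).sum]

-- ===== PRECONDITION & SPEC =====
def Spec_aliveCells (board : List (List Int)) (out : List Int) : Prop := out = aliveCells_alt board
instance (board : List (List Int)) (out : List Int) : Decidable (Spec_aliveCells board out) := by unfold Spec_aliveCells; infer_instance

-- ===== CLAIM (what is proved, stated in full; the proofs are below) =====
def Claim_equal_aliveCells : Prop := ∀ (board : List (List Int)), Dom_aliveCells board → Spec_aliveCells board (aliveCells board)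

-- ===== LEMMAS AND PROOFS =====

-- the inner loop over one row adds that row's counts of 1 and 2 to the accumulator
theorem pvInnerRow (row : List Int) (st : Int × Int) :
    row.foldl
      (fun st v => if v = 1 then (st.1 + 1, st.2) else if v = 2 then (st.1, st.2 + 1) else st)
      st = (st.1 + row.count 1, st.2 + row.count 2) := by
  induction row generalizing st with
  | nil => simp
  | cons x xs ih =>
    simp only [List.foldl_cons, List.count_cons]
    by_cases h1 : x = 1
    · subst h1; rw [if_pos rfl, ih]; simp; ring
    · by_cases h2 : x = 2
      · subst h2; rw [if_neg h1, if_pos rfl, ih]; simp [h1]; ring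
      · rw [if_neg h1, if_neg h2, ih]; simp [h1, h2]

-- A's index-driven inner loop is the row fold
theorem pvInnerIdx (row : List Int) (st : Int × Int) :
    (PySem.List.pyRange 0 (row.length : Int)).foldl
      (fun st j =>
        if PySem.List.pyGetD row j 0 = 1 then (st.1 + 1, st.2)
        else if PySem.List.pyGetD row j 0 = 2 then (st.1, st.2 + 1)
        else st) st
    = (st.1 + row.count 1, st.2 + row.count 2) := by
  rw [PySem.List.foldl_pyRange_zero_pyGetD' row 0
      (fun st v => if v = 1 then (st.1 + 1, st.2) else if v = 2 then (st.1, st.2 + 1) else st) st]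
  exact pvInnerRow row st

-- the outer loop accumulates the per-row counts, i.e. the two staged sums
theorem pvOuter (board : List (List Int)) (st : Int × Int) :
    board.foldl (fun st row => (st.1 + (row.count 1 : Int), st.2 + (row.count 2 : Int))) st
    = (st.1 + (board.map (fun row => (row.count 1 : Int))).sum,
       st.2 + (board.map (fun row => (row.count 2 : Int))).sum) := by
  induction board generalizing st with
  | nil => simp
  | cons r rs ih =>
    rw [List.foldl_cons, ih]
    simp only [List.map_cons, List.sum_cons, Prod.mk.injEq]
    constructor <;> ring

-- ===== VERDICT (by name: the statement is the Claim_ definition above) =====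
theorem aliveCells_spec : Claim_equal_aliveCells := by
  intro board _
  show aliveCells board = aliveCells_alt board
  simp only [aliveCells, aliveCells_alt]
  rw [PySem.List.foldl_pyRange_zero_pyGetD' board []
      (fun st row =>
        (PySem.List.pyRange 0 (row.length : Int)).foldl
          (fun st j =>
            if PySem.List.pyGetD row j 0 = 1 then (st.1 + 1, st.2)
            else if PySem.List.pyGetD row j 0 = 2 then (st.1, st.2 + 1)
            else st) st) ((0 : Int), (0 : Int))]
  simp only [pvInnerIdx]
  rw [pvOuter]
  simp
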